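-- pv_equiv track=rewrite | github.com/h4wwk3ye/code | Hackerrank/Data Structures/stack and queue/poisnous_plants.py | check_plant
-- ===== SOURCE A (Python) =====
-- def check_plant(array):
--
--     count = 0
--     while True:
--         flag = 0
--         for i in range(len(array)-1, 0, -1):
--             if array[i] > array[i-1]:
--                 del array[i]
--                 flag = 1
--         if flag == 1:
--             count += 1
--         if flag == 0:
--             return count
-- ===== SOURCE B (Python) =====
-- def check_plant(array):
--     stack = []  # (value, day this plant dies; 0 = survives)
--     max_days = 0
--     for x in array:
--         days = 0
--         while stack and stack[-1][0] >= x: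
--             if stack[-1][1] > days:
--                 days = stack[-1][1]
--             stack.pop()
--         days = days + 1 if stack else 0
--         if days > max_days:
--             max_days = days
--         stack.append((x, days))
--     return max_days
-- ===== Notes on version B (the rewrite author's own statement) =====
-- stated objective: alternative
-- what changed: A repeatedly re-scans the array, deleting every plant greater than its left neighbour, until a pass makes no deletion, and counts the passes; B instead makes a single left-to-right sweep with a monotonic stack of (value, day-of-death) pairs and returns the maximum death day, which equals the number of deleting passes A performs.
import Mathlib
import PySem

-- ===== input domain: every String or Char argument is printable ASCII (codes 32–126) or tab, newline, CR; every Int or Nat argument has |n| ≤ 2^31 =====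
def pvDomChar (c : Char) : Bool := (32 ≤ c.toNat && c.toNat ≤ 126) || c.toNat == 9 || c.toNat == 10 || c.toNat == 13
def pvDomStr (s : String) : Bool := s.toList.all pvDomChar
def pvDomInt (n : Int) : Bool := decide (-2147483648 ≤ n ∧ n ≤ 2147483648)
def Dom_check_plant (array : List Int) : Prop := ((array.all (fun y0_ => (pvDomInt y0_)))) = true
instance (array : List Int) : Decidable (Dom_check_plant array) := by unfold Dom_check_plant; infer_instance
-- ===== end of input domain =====

-- B replaces A's repeated full-array deletion passes (counting passes until stable) by a
-- single monotonic-stack sweep computing each plant's death day and returning the largest;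
-- A mutates its argument in place — the equivalence proved here is about the return value only.


-- ===== PORT A =====
-- 'for i in range(len(array)-1, 0, -1): if array[i] > array[i-1]: del array[i]; flag = 1'
-- (indices are always in range, so array[i] is ported as pyGetD; del array[i] is eraseIdx)
def passLoopA (arr : List Int) (flag : Int) (i : Nat) : List Int × Int :=
  match i with
  | 0 => (arr, flag)
  | Nat.succ k =>
    if PySem.List.pyGetD arr ((k + 1 : Nat) : Int) 0 > PySem.List.pyGetD arr ((k : Nat) : Int) 0 then
      passLoopA (arr.eraseIdx (k + 1)) 1 k
    else
      passLoopA arr flag k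

-- termination helpers for the outer 'while True' loop (each flagged pass shrinks the array)
theorem passLoopA_length_le : ∀ (i : Nat) (arr : List Int) (f : Int),
    (passLoopA arr f i).1.length ≤ arr.length := by
  intro i
  induction i with
  | zero => intro arr f; exact le_rfl
  | succ k ih =>
    intro arr f
    simp only [passLoopA]
    split
    · refine le_trans (ih _ _) ?_
      rw [List.length_eraseIdx]
      split <;> omega
    · exact ih _ _

theorem passLoopA_dec : ∀ (i : Nat) (arr : List Int) (f : Int), i < arr.length →
    (passLoopA arr f i).2 = f ∨ (passLoopA arr f i).1.length < arr.length := by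
  intro i
  induction i with
  | zero => intro arr f _; left; rfl
  | succ k ih =>
    intro arr f h
    simp only [passLoopA]
    split
    · right
      refine lt_of_le_of_lt (passLoopA_length_le _ _ _) ?_
      rw [List.length_eraseIdx]
      split <;> omega
    · exact ih arr f (by omega)

-- 'while True: flag = 0; <pass>; if flag == 1: count += 1; if flag == 0: return count'
def outerA (arr : List Int) (count : Int) : Int :=
  let p := passLoopA arr 0 (arr.length - 1)
  if h : p.2 = 1 then outerA p.1 (count + 1) else count
termination_by arr.length
decreasing_by
  have h' : (passLoopA arr 0 (arr.length - 1)).2 = 1 := h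
  rcases List.eq_nil_or_concat arr with rfl | ⟨l, b, rfl⟩
  · simp [passLoopA] at h'
  · simp only [List.concat_eq_append] at h' ⊢
    rcases passLoopA_dec ((l ++ [b]).length - 1) (l ++ [b]) 0
        (by simp only [List.length_append, List.length_cons, List.length_nil]; omega) with h0 | h0
    · rw [h0] at h'; omega
    · exact h0

def check_plant (array : List Int) : Int := outerA array 0

-- ===== PORT B =====
-- 'while stack and stack[-1][0] >= x: days = max(days, stack[-1][1]); stack.pop()' and the
-- following 'days = days + 1 if stack else 0', fused into one recursion over the stack
def popB (stack : List (Int × Int)) (x : Int) (days : Int) : Int × List (Int × Int) :=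
  match stack with
  | [] => (0, [])
  | (v, dv) :: rest =>
    if v ≥ x then popB rest x (if dv > days then dv else days)
    else (days + 1, (v, dv) :: rest)

-- 'for x in array: … stack.append((x, days)); max_days = max(max_days, days)'
def foldB (stack : List (Int × Int)) (maxd : Int) (l : List Int) : Int :=
  match l with
  | [] => maxd
  | x :: xs =>
    let p := popB stack x 0
    foldB ((x, p.1) :: p.2) (if p.1 > maxd then p.1 else maxd) xs

def check_plant_alt (array : List Int) : Int := foldB [] 0 array

-- ===== PRECONDITION & SPEC =====
def Spec_check_plant (array : List Int) (out : Int) : Prop := out = check_plant_alt array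
instance (array : List Int) (out : Int) : Decidable (Spec_check_plant array out) := by unfold Spec_check_plant; infer_instance

-- ===== CLAIM (what is proved, stated in full; the proofs are below) =====
def Claim_equal_check_plant : Prop := ∀ (array : List Int), Dom_check_plant array → Spec_check_plant array (check_plant array)

-- ===== LEMMAS AND PROOFS =====

-- one simulation day, specified functionally: an element is deleted iff it is greater
-- than its predecessor in the array as it stood at the start of the pass
def surv (p : Int) : List Int → List Int
  | [] => []
  | x :: xs => if x > p then surv x xs else x :: surv x xs

def died (p : Int) : List Int → Bool
  | [] => false
  | x :: xs => decide (x > p) || died x xs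

def step : List Int → List Int
  | [] => []
  | a :: t => a :: surv a t

def stepped : List Int → Bool
  | [] => false
  | a :: t => died a t

theorem surv_length_le : ∀ (t : List Int) (p : Int), (surv p t).length ≤ t.length := by
  intro t
  induction t with
  | nil => intro p; simp [surv]
  | cons x xs ih => intro p; simp only [surv]; split <;> simp <;> exact le_trans (ih x) (by omega)

theorem surv_length_lt : ∀ (t : List Int) (p : Int), died p t = true → (surv p t).length < t.length := by
  intro t
  induction t with
  | nil => intro p h; simp [died] at h
  | cons x xs ih =>
    intro p h
    simp only [died, Bool.or_eq_true, decide_eq_true_eq] at h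
    simp only [surv]
    split
    · exact lt_of_le_of_lt (surv_length_le xs x) (by simp)
    · rename_i hx
      rcases h with h | h
      · omega
      · simpa using ih x h

def countSteps (l : List Int) : Int :=
  if h : stepped l = true then 1 + countSteps (step l) else 0
termination_by l.length
decreasing_by
  rcases l with _ | ⟨a, t⟩
  · simp [stepped] at h
  · simpa [step] using surv_length_lt t a (by simpa [stepped] using h)

-- ---- pass characterization: passLoopA computes surv/died ----

theorem getD_cons_append_lastD : ∀ (t : List Int) (a : Int) (rest : List Int),
    ((a :: t) ++ rest).getD t.length 0 = t.getLastD a := by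
  intro t
  induction t with
  | nil => intro a rest; simp
  | cons x xs ih =>
    intro a rest
    simp only [List.cons_append, List.getLastD_cons]
    exact ih x rest

theorem surv_concat : ∀ (t : List Int) (p z : Int),
    surv p (t ++ [z]) =
      surv p t ++ (if z > t.getLastD p then [] else [z]) := by
  intro t
  induction t with
  | nil => intro p z; simp [surv]
  | cons x xs ih =>
    intro p z
    simp only [List.cons_append, surv, List.getLastD_cons]
    split <;> simp [ih x z]

theorem died_concat : ∀ (t : List Int) (p z : Int),
    died p (t ++ [z]) = (died p t || decide (z > t.getLastD p)) := by
  intro t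
  induction t with
  | nil => intro p z; simp [died]
  | cons x xs ih =>
    intro p z
    simp only [List.cons_append, died, ih x z, List.getLastD_cons]
    rw [Bool.or_assoc]

theorem passLoopA_gen : ∀ (t : List Int) (a : Int) (rest : List Int) (f : Int),
    passLoopA (a :: (t ++ rest)) f t.length =
      (a :: (surv a t ++ rest), if died a t then 1 else f) := by
  intro t
  induction t using List.reverseRecOn with
  | nil => intro a rest f; simp [passLoopA, surv, died]
  | append_singleton t' z ih =>
    intro a rest f
    have hlen : (t' ++ [z]).length = t'.length + 1 := by simp
    rw [hlen]
    simp only [passLoopA, PySem.List.pyGetD_natCast]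
    have harr : a :: ((t' ++ [z]) ++ rest) = (a :: t') ++ ([z] ++ rest) := by simp
    have hz : (a :: ((t' ++ [z]) ++ rest)).getD (t'.length + 1) 0 = z := by
      rw [harr]
      rw [List.getD_eq_getElem?_getD]
      rw [List.getElem?_append_right (by simp)]
      simp
    have hlast : (a :: ((t' ++ [z]) ++ rest)).getD t'.length 0 = t'.getLastD a := by
      have : a :: ((t' ++ [z]) ++ rest) = (a :: t') ++ ([z] ++ rest) := by simp
      rw [this, getD_cons_append_lastD]
    rw [hz, hlast]
    split
    · rename_i hgt
      have herase : (a :: ((t' ++ [z]) ++ rest)).eraseIdx (t'.length + 1) = a :: (t' ++ rest) := by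
        rw [harr]
        have : (a :: t').length = t'.length + 1 := by simp
        rw [← this, List.eraseIdx_append_of_length_le (by simp)]
        simp
      rw [herase, ih a rest 1]
      rw [surv_concat, died_concat, if_pos hgt, decide_eq_true hgt]
      simp
    · rename_i hle
      have : a :: ((t' ++ [z]) ++ rest) = a :: (t' ++ ([z] ++ rest)) := by simp
      rw [this, ih a ([z] ++ rest) f]
      rw [surv_concat, died_concat, if_neg hle, decide_eq_false hle]
      simp

theorem passLoopA_spec : ∀ (arr : List Int),
    passLoopA arr 0 (arr.length - 1) = (step arr, if stepped arr then 1 else 0) := by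
  intro arr
  rcases arr with _ | ⟨a, t⟩
  · simp [passLoopA, step, stepped]
  · have : (a :: t).length - 1 = t.length := by simp
    rw [this]
    have := passLoopA_gen t a [] 0
    simpa [step, stepped] using this

theorem outerA_eq_countSteps : ∀ (n : Nat) (arr : List Int), arr.length ≤ n → ∀ (c : Int),
    outerA arr c = c + countSteps arr := by
  intro n
  induction n with
  | zero =>
    intro arr h c
    have : arr = [] := by cases arr <;> simp_all
    subst this
    rw [outerA, countSteps]
    simp [passLoopA, stepped]
  | succ n ih =>
    intro arr h c
    rw [outerA, countSteps]
    simp only [passLoopA_spec]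
    by_cases hs : stepped arr = true
    · simp only [hs]
      have hlt : (step arr).length < arr.length := by
        rcases arr with _ | ⟨a, t⟩
        · simp [stepped] at hs
        · simpa [step] using surv_length_lt t a (by simpa [stepped] using hs)
      rw [ih (step arr) (by omega) (c + 1)]
      simp
      ring
    · simp [hs]

theorem check_plant_eq_countSteps (arr : List Int) : check_plant arr = countSteps arr := by
  have := outerA_eq_countSteps arr.length arr le_rfl 0
  simpa [check_plant] using this

-- ---- B-side: the monotonic stack ----

-- stack invariant: values strictly decrease from top (head) to bottom, every non-bottom
-- entry carries a death day ≥ 1, and the bottom entry carries death day 0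
def InvS : List (Int × Int) → Prop
  | [] => True
  | [(_, d)] => d = 0
  | (v, d) :: q :: rest => 1 ≤ d ∧ q.1 < v ∧ InvS (q :: rest)

-- the day-shift map: what one simulation day does to the stack
def phi : List (Int × Int) → List (Int × Int) :=
  fun s => s.filterMap (fun p => if p.2 = 1 then none else some (p.1, max 0 (p.2 - 1)))

theorem InvS_tail (v dv : Int) (s : List (Int × Int)) (h : InvS ((v, dv) :: s)) : InvS s := by
  cases s with
  | nil => trivial
  | cons q rest => exact h.2.2

theorem InvS_lt_head : ∀ (s : List (Int × Int)) (v dv : Int), InvS ((v, dv) :: s) →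
    ∀ p ∈ s, p.1 < v := by
  intro s
  induction s with
  | nil => intro v dv _ p hp; simp at hp
  | cons q rest ih =>
    intro v dv h p hp
    obtain ⟨q1, q2⟩ := q
    rcases h with ⟨-, hq, hrest⟩
    rcases List.mem_cons.mp hp with rfl | hp
    · exact hq
    · exact lt_trans (ih q1 q2 hrest p hp) hq

theorem phi_cons (v dv : Int) (s : List (Int × Int)) :
    phi ((v, dv) :: s) = if dv = 1 then phi s else (v, max 0 (dv - 1)) :: phi s := by
  by_cases h : dv = 1 <;> simp [phi, h]

theorem phi_ne_nil : ∀ (s : List (Int × Int)), InvS s → s ≠ [] → phi s ≠ [] := by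
  intro s
  induction s with
  | nil => intro _ h; exact absurd rfl h
  | cons p rest ih =>
    intro hI _
    obtain ⟨v, dv⟩ := p
    rw [phi_cons]
    cases rest with
    | nil =>
      have h0 : dv = 0 := hI
      simp [h0]
    | cons q rest' =>
      rcases hI with ⟨hd, -, hrest⟩
      split
      · exact ih hrest (by simp)
      · simp

theorem popB_nonneg : ∀ (s : List (Int × Int)) (x d : Int), 0 ≤ d → 0 ≤ (popB s x d).1 := by
  intro s
  induction s with
  | nil => intro x d hd; simp [popB]
  | cons p rest ih =>
    intro x d hd
    obtain ⟨v, dv⟩ := p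
    simp only [popB]
    split
    · exact ih x _ (by split <;> omega)
    · simp; omega

theorem popB_push_inv : ∀ (s : List (Int × Int)) (x d : Int), InvS s → 0 ≤ d →
    InvS ((x, (popB s x d).1) :: (popB s x d).2) := by
  intro s
  induction s with
  | nil => intro x d _ _; simp only [popB]; rfl
  | cons p rest ih =>
    intro x d hI hd
    obtain ⟨v, dv⟩ := p
    simp only [popB]
    split
    · exact ih x _ (InvS_tail v dv rest hI) (by split <;> omega)
    · rename_i hvx
      exact ⟨by omega, by omega, hI⟩

theorem popB_acc_big : ∀ (s : List (Int × Int)) (x d : Int), 1 ≤ d →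
    (popB s x d).1 = 0 ∨ 2 ≤ (popB s x d).1 := by
  intro s
  induction s with
  | nil => intro x d _; left; simp [popB]
  | cons p rest ih =>
    intro x d hd
    obtain ⟨v, dv⟩ := p
    simp only [popB]
    split
    · exact ih x _ (by split <;> omega)
    · right; simp; omega

theorem popB_ne_one : ∀ (s : List (Int × Int)) (x : Int), InvS s → s ≠ [] →
    x ≤ (s.headD (0, 0)).1 → (popB s x 0).1 ≠ 1 := by
  intro s x hI hne hx
  cases s with
  | nil => exact absurd rfl hne
  | cons p rest =>
    obtain ⟨v, dv⟩ := p
    simp only [List.headD_cons] at hx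
    simp only [popB, if_pos (by omega : v ≥ x)]
    cases rest with
    | nil => simp [popB]
    | cons q rest' =>
      rcases hI with ⟨hd, -, -⟩
      rcases popB_acc_big (q :: rest') x (if dv > 0 then dv else 0) (by omega) with h | h <;> omega

-- one pop pass commutes with the day-shift map phi
theorem pop_phi : ∀ (s : List (Int × Int)) (x d : Int), InvS s → 0 ≤ d →
    (1 ≤ d ∨ (s ≠ [] → x ≤ (s.headD (0, 0)).1)) →
    popB (phi s) x (max 0 (d - 1)) = (max 0 ((popB s x d).1 - 1), phi ((popB s x d).2)) := by
  intro s
  induction s with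
  | nil =>
    intro x d _ _ _
    simp [popB, phi]
  | cons p rest ih =>
    intro x d hI hd hH
    obtain ⟨v, dv⟩ := p
    have hdv0 : 0 ≤ dv := by
      cases rest with
      | nil => have : dv = 0 := hI; omega
      | cons q rest' => rcases hI with ⟨h1, -, -⟩; omega
    by_cases hvx : v ≥ x
    · -- pop branch
      have hstep : popB ((v, dv) :: rest) x d = popB rest x (max d dv) := by
        simp only [popB, if_pos hvx]
        congr 1
        split <;> omega
      rw [hstep, phi_cons]
      by_cases h1 : dv = 1
      · -- the popped entry is absent from phi s
        have hrest : rest ≠ [] := by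
          cases rest with
          | nil => have : dv = 0 := hI; omega
          | cons q rest' => simp
        rcases List.exists_cons_of_ne_nil hrest with ⟨q, rest', rfl⟩
        rcases hI with ⟨hdge, -, hrestI⟩
        rw [if_pos h1]
        have hmx : max 0 (d - 1) = max 0 (max d dv - 1) := by omega
        rw [hmx]
        exact ih x (max d dv) hrestI (by omega) (Or.inl (by omega))
      · rw [if_neg h1]
        simp only [popB, if_pos hvx]
        have hacc : (if max 0 (dv - 1) > max 0 (d - 1) then max 0 (dv - 1) else max 0 (d - 1))
            = max 0 (max d dv - 1) := by split <;> omega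
        rw [hacc]
        cases rest with
        | nil =>
          have h0 : dv = 0 := hI
          subst h0
          simp [popB, phi]
        | cons q rest' =>
          rcases hI with ⟨hdge, -, hrestI⟩
          exact ih x (max d dv) hrestI (by omega) (Or.inl (by omega))
    · -- stop branch: the head survives the comparison; here 1 ≤ d is forced
      have hd1 : 1 ≤ d := by
        rcases hH with h | h
        · exact h
        · have := h (by simp)
          simp only [List.headD_cons] at this
          omega
      have hstop : popB ((v, dv) :: rest) x d = (d + 1, (v, dv) :: rest) := by
        simp [popB, hvx]
      rw [hstop, phi_cons]
      by_cases h1 : dv = 1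
      · -- head dies tomorrow: phi drops it, but everything below is still < x
        have hrest : rest ≠ [] := by
          cases rest with
          | nil => have : dv = 0 := hI; omega
          | cons q rest' => simp
        have hrestI : InvS rest := InvS_tail v dv rest hI
        have hphine : phi rest ≠ [] := phi_ne_nil rest hrestI hrest
        rcases List.exists_cons_of_ne_nil hphine with ⟨⟨w, e⟩, tail, hw⟩
        have hwlt : w < v := by
          have hmem : (w, e) ∈ phi rest := by rw [hw]; simp
          rcases List.mem_filterMap.mp hmem with ⟨⟨w', e'⟩, hmem', hfe⟩
          have : w' < v := InvS_lt_head rest v dv hI _ hmem'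
          by_cases he : e' = 1 <;> simp [he] at hfe
          omega
        rw [if_pos h1, hw]
        simp only [popB, if_neg (by omega : ¬ w ≥ x)]
        rw [← hw]
        simp only [Prod.mk.injEq]
        exact ⟨by omega, trivial⟩
      · rw [if_neg h1]
        simp only [popB, if_neg (by omega : ¬ v ≥ x)]
        simp only [Prod.mk.injEq]
        exact ⟨by omega, trivial⟩

-- accumulator bookkeeping for foldB
theorem foldB_ge : ∀ (l : List Int) (s : List (Int × Int)) (m : Int), m ≤ foldB s m l := by
  intro l
  induction l with
  | nil => intro s m; simp [foldB]
  | cons x xs ih =>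
    intro s m
    simp only [foldB]
    exact le_trans (by split <;> omega) (ih _ _)

-- a full day of the stack sweep commutes with one simulation pass
theorem foldB_phi : ∀ (l : List Int) (v dv : Int) (s : List (Int × Int)) (m : Int),
    InvS ((v, dv) :: s) → 0 ≤ m →
    foldB (phi ((v, dv) :: s)) (max 0 (m - 1)) (surv v l)
      = max 0 (foldB ((v, dv) :: s) m l - 1) := by
  intro l
  induction l with
  | nil => intro v dv s m _ _; simp [surv, foldB]
  | cons x xs ih =>
    intro v dv s m hI hm
    by_cases hx : x > v
    · -- x > its predecessor: x dies on day 1 and is absent after the pass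
      have hsurv : surv v (x :: xs) = surv x xs := by simp [surv, hx]
      have hpop : popB ((v, dv) :: s) x 0 = (1, (v, dv) :: s) := by
        simp [popB]; omega
      rw [hsurv]
      conv_rhs => rw [foldB]
      rw [hpop]
      have hnext : InvS ((x, 1) :: (v, dv) :: s) := ⟨le_refl 1, hx, hI⟩
      have := ih x 1 ((v, dv) :: s) (if (1 : Int) > m then 1 else m) hnext (by split <;> omega)
      rw [phi_cons, if_pos rfl] at this
      rw [show max 0 (m - 1) = max 0 ((if (1 : Int) > m then 1 else m) - 1) from by split <;> omega]
      exact this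
    · -- x survives the pass; process it on both sides
      have hsurv : surv v (x :: xs) = x :: surv x xs := by simp [surv, hx]
      cases hpx : popB ((v, dv) :: s) x 0 with
      | mk dx s' =>
      have hdx0 : 0 ≤ dx := by
        have := popB_nonneg ((v, dv) :: s) x 0 le_rfl; rw [hpx] at this; exact this
      have hne1 : dx ≠ 1 := by
        have := popB_ne_one ((v, dv) :: s) x hI (by simp)
          (by simp only [List.headD_cons]; omega)
        rw [hpx] at this; exact this
      have hinv' : InvS ((x, dx) :: s') := by
        have := popB_push_inv ((v, dv) :: s) x 0 hI le_rfl; rw [hpx] at this; exact this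
      have hq := pop_phi ((v, dv) :: s) x 0 hI le_rfl
        (Or.inr (fun _ => by simp only [List.headD_cons]; omega))
      rw [hpx] at hq
      have hq' : popB (phi ((v, dv) :: s)) x 0 = (max 0 (dx - 1), phi s') := by
        have h0 : max 0 ((0 : Int) - 1) = 0 := by omega
        rwa [h0] at hq
      rw [hsurv]
      simp only [foldB, hq', hpx]
      have hstack : (x, max 0 (dx - 1)) :: phi s' = phi ((x, dx) :: s') := by
        rw [phi_cons, if_neg hne1]
      have hmaxd : (if max 0 (dx - 1) > max 0 (m - 1) then max 0 (dx - 1) else max 0 (m - 1))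
          = max 0 ((if dx > m then dx else m) - 1) := by
        split_ifs <;> omega
      rw [hstack, hmaxd]
      exact ih x dx s' (if dx > m then dx else m) hinv' (by split <;> omega)
      
-- a non-increasing list is already stable and the sweep reports 0
theorem nodeath_zero : ∀ (t : List Int) (a : Int), died a t = false → foldB [(a, 0)] 0 t = 0 := by
  intro t
  induction t with
  | nil => intro a _; rfl
  | cons x xs ih =>
    intro a h
    simp only [died, Bool.or_eq_false_iff, decide_eq_false_iff_not] at h
    have hax : a ≥ x := by omega
    simp only [foldB, popB, if_pos hax]
    simpa [popB] using ih x h.2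

-- a plant greater than its predecessor forces a positive answer
theorem death_ge_one : ∀ (t : List Int) (v dv : Int) (s : List (Int × Int)) (m : Int),
    died v t = true → 1 ≤ foldB ((v, dv) :: s) m t := by
  intro t
  induction t with
  | nil => intro v dv s m h; simp [died] at h
  | cons x xs ih =>
    intro v dv s m h
    simp only [died, Bool.or_eq_true, decide_eq_true_eq] at h
    by_cases hx : x > v
    · simp only [foldB, popB, if_neg (by omega : ¬ v ≥ x)]
      exact le_trans (by split <;> omega) (foldB_ge xs _ _)
    · have hdied : died x xs = true := by tauto
      simp only [foldB]
      exact ih x _ _ _ hdied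

theorem alt_cons (a : Int) (t : List Int) : check_plant_alt (a :: t) = foldB [(a, 0)] 0 t := by
  simp [check_plant_alt, foldB, popB]

theorem alt_step (l : List Int) : check_plant_alt (step l) = max 0 (check_plant_alt l - 1) := by
  rcases l with _ | ⟨a, t⟩
  · rfl
  · rw [show step (a :: t) = a :: surv a t from rfl, alt_cons, alt_cons]
    have h := foldB_phi t a 0 [] 0 rfl le_rfl
    have hphi : phi [((a : Int), (0 : Int))] = [(a, 0)] := by rw [phi_cons]; norm_num [phi]
    rw [hphi] at h
    simpa using h

theorem countSteps_eq_alt : ∀ (n : Nat) (l : List Int), l.length ≤ n →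
    countSteps l = check_plant_alt l := by
  intro n
  induction n with
  | zero =>
    intro l h
    have : l = [] := by cases l <;> simp_all
    subst this
    rw [countSteps]
    rfl
  | succ n ih =>
    intro l h
    rw [countSteps]
    by_cases hs : stepped l = true
    · rcases l with _ | ⟨a, t⟩
      · simp [stepped] at hs
      · have hdied : died a t = true := by simpa [stepped] using hs
        have hlt : (step (a :: t)).length < (a :: t).length := by
          simpa [step] using surv_length_lt t a hdied
        rw [dif_pos hs, ih (step (a :: t)) (by simp [step] at hlt h ⊢; omega)]
        rw [alt_step]
        have h1 : 1 ≤ check_plant_alt (a :: t) := by rw [alt_cons]; exact death_ge_one t a 0 [] 0 hdied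
        omega
    · rw [dif_neg hs]
      rcases l with _ | ⟨a, t⟩
      · rfl
      · have hdied : died a t = false := by simpa [stepped] using hs
        rw [alt_cons, nodeath_zero t a hdied]

-- ===== VERDICT (by name: the statement is the Claim_ definition above) =====
theorem check_plant_spec : Claim_equal_check_plant := by
  intro array _
  unfold Spec_check_plant
  rw [check_plant_eq_countSteps, countSteps_eq_alt array.length array le_rfl]
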